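-- pv_equiv track=rewrite | github.com/shannai37/data_analyst | privacy.py | is_valid_user_id
-- ===== SOURCE A (Python) =====
-- def is_valid_user_id(user_id: str) -> bool:
--     """
--     /// 验证用户ID格式
--     /// @param user_id: 用户ID
--     /// @return: 是否有效
--     """
--     if not user_id or not isinstance(user_id, str):
--         return False
--
--     # 基本长度检查
--     if len(user_id) < 3 or len(user_id) > 50:
--         return False
--
--     # 字符检查 (允许字母、数字、下划线、连字符)
--     import string
--     allowed_chars = string.ascii_letters + string.digits + '_-'
--     return all(c in allowed_chars for c in user_id)
-- ===== SOURCE B (Python) =====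
-- import re
--
-- _USER_ID_RE = re.compile(r'[A-Za-z0-9_-]{3,50}')
--
--
-- def is_valid_user_id(user_id: str) -> bool:
--     """
--     /// 验证用户ID格式
--     /// @param user_id: 用户ID
--     /// @return: 是否有效
--     """
--     if not user_id or not isinstance(user_id, str):
--         return False
--     return _USER_ID_RE.fullmatch(user_id) is not None
-- ===== Notes on version B (the rewrite author's own statement) =====
-- stated objective: idiomatic
-- what changed: The explicit length comparison and per-character membership scan over a 64-char allowed string are replaced by a single anchored compiled-regex test re.fullmatch(r'[A-Za-z0-9_-]{3,50}', user_id), keeping only the falsy/non-str guard.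
import Mathlib
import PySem

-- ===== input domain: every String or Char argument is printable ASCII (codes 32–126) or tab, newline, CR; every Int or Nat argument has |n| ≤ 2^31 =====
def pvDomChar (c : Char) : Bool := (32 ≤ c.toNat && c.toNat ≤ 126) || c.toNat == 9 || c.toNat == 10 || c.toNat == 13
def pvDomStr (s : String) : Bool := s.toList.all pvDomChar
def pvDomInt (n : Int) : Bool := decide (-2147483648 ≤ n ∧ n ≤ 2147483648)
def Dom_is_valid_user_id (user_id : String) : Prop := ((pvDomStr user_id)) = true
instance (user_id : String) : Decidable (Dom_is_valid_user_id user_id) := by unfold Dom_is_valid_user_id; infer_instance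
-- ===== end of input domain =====

-- B replaces A's explicit length comparison and per-character allowed-string scan with a single
-- anchored regex test re.fullmatch(r'[A-Za-z0-9_-]{3,50}', ...); return value equivalence proved below.

-- ===== PORT A =====
-- string.ascii_letters + string.digits + '_-' as the explicit list of its characters
def pvAllowedChars : List Char :=
  ['a','b','c','d','e','f','g','h','i','j','k','l','m','n','o','p','q','r','s','t','u','v','w','x','y','z',
   'A','B','C','D','E','F','G','H','I','J','K','L','M','N','O','P','Q','R','S','T','U','V','W','X','Y','Z',
   '0','1','2','3','4','5','6','7','8','9','_','-']

def is_valid_user_id (user_id : String) : Bool :=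
  -- 'not user_id' for a str is exactly emptiness; the isinstance branch cannot fire for a str argument
  if user_id.toList = [] then false
  else if user_id.toList.length < 3 || 50 < user_id.toList.length then false
  -- single-char 'c in allowed_chars' (Python substring test) is exactly list membership
  else user_id.toList.all (fun c => pvAllowedChars.contains c)

-- ===== PORT B =====
-- the character class [A-Za-z0-9_-] of B's regex, as the regex engine's range tests
def pvClassChar (c : Char) : Bool :=
  ('A' ≤ c && c ≤ 'Z') || ('a' ≤ c && c ≤ 'z') || ('0' ≤ c && c ≤ '9') || c == '_' || c == '-'

def is_valid_user_id_alt (user_id : String) : Bool :=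
  if user_id.toList = [] then false
  -- re.fullmatch([A-Za-z0-9_-]{3,50}) ported exactly: whole string, 3..50 repetitions of the class
  else decide (3 ≤ user_id.toList.length ∧ user_id.toList.length ≤ 50)
       && user_id.toList.all pvClassChar

-- ===== PRECONDITION & SPEC =====
def Spec_is_valid_user_id (user_id : String) (out : Bool) : Prop := out = is_valid_user_id_alt user_id
instance (user_id : String) (out : Bool) : Decidable (Spec_is_valid_user_id user_id out) := by unfold Spec_is_valid_user_id; infer_instance

-- ===== CLAIM (what is proved, stated in full; the proofs are below) =====
def Claim_equal_is_valid_user_id : Prop := ∀ (user_id : String), Dom_is_valid_user_id user_id → Spec_is_valid_user_id user_id (is_valid_user_id user_id)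

-- ===== LEMMAS AND PROOFS =====

-- membership in the 64-character allowed list is exactly the regex class test
theorem pv_char_class (c : Char) : decide (c ∈ pvAllowedChars) = pvClassChar c := by
  rw [Bool.eq_iff_iff]
  simp [pvAllowedChars, pvClassChar, Char.ext_iff, Char.le_def,
    UInt32.le_iff_toNat_le, UInt32.ext_iff]
  omega

-- ===== VERDICT (by name: the statement is the Claim_ definition above) =====
theorem is_valid_user_id_spec : Claim_equal_is_valid_user_id := by
  intro u _
  unfold Spec_is_valid_user_id is_valid_user_id is_valid_user_id_alt
  by_cases hnil : u.toList = []
  · simp [hnil]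
  · have hL : u.toList.length = u.length := by simp
    by_cases hlen : u.length < 3 ∨ 50 < u.length
    · rcases hlen with h | h <;> simp [hnil, hL, h]
    · have h1 : ¬ u.length < 3 := by omega
      have h2 : ¬ 50 < u.length := by omega
      simp [hnil, hL, h1, h2, Nat.le_of_not_lt h1, Nat.le_of_not_lt h2, pv_char_class]
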